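-- pv_equiv track=rewrite | github.com/ericksamera/qiime-scraper | src/qs/metadata/read.py | collect_unique_primers
-- ===== SOURCE A (Python) =====
-- from typing import Dict, List, Tuple
--
-- def collect_unique_primers(
--     rows: List[Dict[str, str]],
--     f_col: str = "__f_primer",
--     r_col: str = "__r_primer",
-- ) -> Tuple[List[str], List[str]]:
--     """
--     Collect sorted unique forward and reverse primer sequences from metadata rows.
--     Blank cells are ignored.
--     """
--     fset, rset = set(), set()
--     for r in rows:
--         f = (r.get(f_col) or "").strip()
--         g = (r.get(r_col) or "").strip()
--         if f:
--             fset.add(f)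
--         if g:
--             rset.add(g)
--     return sorted(fset), sorted(rset)
-- ===== SOURCE B (Python) =====
-- from typing import Dict, List, Tuple
--
-- def collect_unique_primers(
--     rows: List[Dict[str, str]],
--     f_col: str = "__f_primer",
--     r_col: str = "__r_primer",
-- ) -> Tuple[List[str], List[str]]:
--     # Sort-then-scan instead of a hash set: gather the non-blank stripped
--     # values of one column WITH duplicates, sort them, then keep each value
--     # whose successor differs (last of each run of equals).
--     def uniq_sorted(col: str) -> List[str]:
--         vals = sorted(v for r in rows if (v := (r.get(col) or "").strip()))
--         return [x for x, nxt in zip(vals, vals[1:] + [""]) if x != nxt]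
--     return uniq_sorted(f_col), uniq_sorted(r_col)
-- ===== Notes on version B (the rewrite author's own statement) =====
-- stated objective: alternative
-- what changed: Replaced the hash-set accumulation with a sort-then-scan per column: collect the non-blank values with duplicates, sort the multiset, then drop adjacent duplicates by comparing each element with its successor; no set is ever built.
import Mathlib
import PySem

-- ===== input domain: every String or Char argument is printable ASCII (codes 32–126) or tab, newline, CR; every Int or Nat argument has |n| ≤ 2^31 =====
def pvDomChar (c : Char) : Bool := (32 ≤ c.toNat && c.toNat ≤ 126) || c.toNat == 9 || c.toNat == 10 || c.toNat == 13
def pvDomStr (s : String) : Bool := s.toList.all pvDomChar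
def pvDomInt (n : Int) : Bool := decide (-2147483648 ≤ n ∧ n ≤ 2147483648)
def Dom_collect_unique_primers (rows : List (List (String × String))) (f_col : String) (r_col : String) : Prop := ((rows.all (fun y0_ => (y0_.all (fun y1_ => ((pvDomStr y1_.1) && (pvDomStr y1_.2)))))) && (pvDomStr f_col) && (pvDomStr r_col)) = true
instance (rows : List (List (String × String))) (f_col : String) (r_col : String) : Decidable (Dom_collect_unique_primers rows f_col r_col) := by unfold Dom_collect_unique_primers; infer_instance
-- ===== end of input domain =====

-- ===== PORT A =====
-- B replaces A's two hash sets with a sort-then-scan per column (sort the value multiset, drop adjacent duplicates); alternative, same cost.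
def collect_unique_primers (rows : List (List (String × String))) (f_col : String) (r_col : String) : List String × List String :=
  let p := rows.foldl (fun (st : PySem.Set String × PySem.Set String) r =>
    let f := PySem.Str.strip (((PySem.Dict.mk r).get? f_col).getD "")
    let g := PySem.Str.strip (((PySem.Dict.mk r).get? r_col).getD "")
    let st1 := if f ≠ "" then (PySem.Set.add st.1 f, st.2) else st
    let st2 := if g ≠ "" then (st1.1, PySem.Set.add st1.2 g) else st1
    st2) (PySem.Set.empty, PySem.Set.empty)
  (PySem.List.sorted p.1 (fun x => x) false, PySem.List.sorted p.2 (fun x => x) false)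

-- ===== PORT B =====
-- the filtered value list of one column: (v for r in rows if (v := (r.get(col) or "").strip()))
def cupVals (rows : List (List (String × String))) (col : String) : List String :=
  rows.filterMap (fun r =>
    let v := PySem.Str.strip (((PySem.Dict.mk r).get? col).getD "")
    if v ≠ "" then some v else none)

-- [x for x, nxt in zip(vals, vals[1:] + [""]) if x != nxt]
def cupKeep (vals : List String) : List String :=
  ((vals.zip (vals.drop 1 ++ [""])).filter (fun p => p.1 ≠ p.2)).map (·.1)

-- def uniq_sorted(col): vals = sorted(...); return [x for x, nxt in zip(vals, vals[1:] + [""]) if x != nxt]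
def cupUniqSorted (rows : List (List (String × String))) (col : String) : List String :=
  cupKeep (PySem.List.sorted (cupVals rows col) (fun x => x) false)

def collect_unique_primers_alt (rows : List (List (String × String))) (f_col : String) (r_col : String) : List String × List String :=
  (cupUniqSorted rows f_col, cupUniqSorted rows r_col)

-- ===== PRECONDITION & SPEC =====
def Spec_collect_unique_primers (rows : List (List (String × String))) (f_col : String) (r_col : String) (out : List String × List String) : Prop := out = collect_unique_primers_alt rows f_col r_col
instance (rows : List (List (String × String))) (f_col : String) (r_col : String) (out : List String × List String) : Decidable (Spec_collect_unique_primers rows f_col r_col out) := by unfold Spec_collect_unique_primers; infer_instance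

-- ===== CLAIM (what is proved, stated in full; the proofs are below) =====
def Claim_equal_collect_unique_primers : Prop := ∀ (rows : List (List (String × String))) (f_col : String) (r_col : String), Dom_collect_unique_primers rows f_col r_col → Spec_collect_unique_primers rows f_col r_col (collect_unique_primers rows f_col r_col)

-- ===== LEMMAS AND PROOFS =====

-- A's interleaved fold over the pair of sets splits into two independent per-column folds.
lemma cup_fold_split (rows : List (List (String × String))) (f_col r_col : String)
    (a b : PySem.Set String) :
    rows.foldl (fun (st : PySem.Set String × PySem.Set String) r =>
      let f := PySem.Str.strip (((PySem.Dict.mk r).get? f_col).getD "")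
      let g := PySem.Str.strip (((PySem.Dict.mk r).get? r_col).getD "")
      let st1 := if f ≠ "" then (PySem.Set.add st.1 f, st.2) else st
      let st2 := if g ≠ "" then (st1.1, PySem.Set.add st1.2 g) else st1
      st2) (a, b)
    = (rows.foldl (fun s r =>
        let v := PySem.Str.strip (((PySem.Dict.mk r).get? f_col).getD "")
        if v ≠ "" then PySem.Set.add s v else s) a,
       rows.foldl (fun s r =>
        let v := PySem.Str.strip (((PySem.Dict.mk r).get? r_col).getD "")
        if v ≠ "" then PySem.Set.add s v else s) b) := by
  induction rows generalizing a b with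
  | nil => rfl
  | cons r rest ih =>
      simp only [List.foldl_cons]
      split_ifs <;> simp_all

-- the conditional-add fold over rows is Set.ofList of the filtered value list
lemma cup_fold_eq_ofList_aux (rows : List (List (String × String))) (col : String)
    (s : PySem.Set String) :
    rows.foldl (fun s r =>
      let v := PySem.Str.strip (((PySem.Dict.mk r).get? col).getD "")
      if v ≠ "" then PySem.Set.add s v else s) s
    = (cupVals rows col).foldl PySem.Set.add s := by
  induction rows generalizing s with
  | nil => rfl
  | cons r rest ih =>
      simp only [List.foldl_cons, cupVals, List.filterMap_cons]
      split_ifs with h <;> simp_all [cupVals]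

lemma cup_fold_eq_ofList (rows : List (List (String × String))) (col : String) :
    rows.foldl (fun s r =>
      let v := PySem.Str.strip (((PySem.Dict.mk r).get? col).getD "")
      if v ≠ "" then PySem.Set.add s v else s) PySem.Set.empty
    = PySem.Set.ofList (cupVals rows col) :=
  cup_fold_eq_ofList_aux rows col PySem.Set.empty

lemma cupKeep_cons_cons (x y : String) (t : List String) :
    cupKeep (x :: y :: t) = if x = y then cupKeep (y :: t) else x :: cupKeep (y :: t) := by
  simp only [cupKeep, List.drop_succ_cons, List.drop_zero, List.cons_append, List.zip_cons_cons,
    List.filter_cons]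
  split_ifs with h <;> simp_all

lemma cupKeep_singleton (x : String) (hx : x ≠ "") : cupKeep [x] = [x] := by
  simp [cupKeep, hx]

lemma mem_cupKeep (vals : List String) (hne : ∀ v ∈ vals, v ≠ "") (a : String) :
    a ∈ cupKeep vals ↔ a ∈ vals := by
  induction vals with
  | nil => simp [cupKeep]
  | cons x t ih =>
      cases t with
      | nil => simp [cupKeep_singleton x (hne x (by simp))]
      | cons y t' =>
          rw [cupKeep_cons_cons]
          have ih' := ih (fun v hv => hne v (List.mem_cons_of_mem _ hv))
          split_ifs with h
          · subst h
            rw [ih']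
            constructor
            · intro hm; exact List.mem_cons_of_mem _ hm
            · intro hm
              rcases List.mem_cons.mp hm with h1 | h2
              · exact h1 ▸ List.mem_cons_self
              · exact h2
          · simp [ih']

lemma pairwise_lt_cupKeep (vals : List String) (hs : vals.Pairwise (· ≤ ·))
    (hne : ∀ v ∈ vals, v ≠ "") : (cupKeep vals).Pairwise (· < ·) := by
  induction vals with
  | nil => simp [cupKeep]
  | cons x t ih =>
      cases t with
      | nil => simp [cupKeep_singleton x (hne x (by simp))]
      | cons y t' =>
          have hs' := (List.pairwise_cons.mp hs).2
          have hne' : ∀ v ∈ y :: t', v ≠ "" := fun v hv => hne v (List.mem_cons_of_mem _ hv)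
          have ih' := ih hs' hne'
          rw [cupKeep_cons_cons]
          split_ifs with h
          · exact ih'
          · refine List.pairwise_cons.mpr ⟨?_, ih'⟩
            intro z hz
            have hzmem : z ∈ y :: t' := (mem_cupKeep _ hne' z).mp hz
            have hxy : x ≤ y := (List.pairwise_cons.mp hs).1 y List.mem_cons_self
            have hxz : x ≤ z := (List.pairwise_cons.mp hs).1 z hzmem
            have hyz : y ≤ z := by
              rcases List.mem_cons.mp hzmem with h1 | h2
              · exact le_of_eq h1.symm
              · exact (List.pairwise_cons.mp hs').1 z h2
            exact lt_of_lt_of_le (lt_of_le_of_ne hxy h) hyz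

lemma cupVals_ne_empty (rows : List (List (String × String))) (col : String) :
    ∀ v ∈ cupVals rows col, v ≠ "" := by
  intro v hv
  simp only [cupVals, List.mem_filterMap] at hv
  obtain ⟨r, _, hr⟩ := hv
  by_cases h : PySem.Str.strip (((PySem.Dict.mk r).get? col).getD "") ≠ "" <;> simp_all

-- per column: sorted(set accumulated by A) = B's sort-then-scan
lemma cup_column (rows : List (List (String × String))) (col : String) :
    PySem.List.sorted (PySem.Set.ofList (cupVals rows col)) (fun x => x) false
      = cupUniqSorted rows col := by
  unfold cupUniqSorted
  set vals := cupVals rows col with hvals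
  have hne : ∀ v ∈ vals, v ≠ "" := cupVals_ne_empty rows col
  have hnes : ∀ v ∈ PySem.List.sorted vals (fun x => x) false, v ≠ "" := by
    intro v hv; exact hne v ((PySem.List.mem_sorted vals _ false v).mp hv)
  have hpw : (cupKeep (PySem.List.sorted vals (fun x => x) false)).Pairwise (· < ·) :=
    pairwise_lt_cupKeep _ (PySem.List.sorted_pairwise vals (fun x => x)) hnes
  apply PySem.List.sorted_eq_of_perm_of_pairwise_lt
  · rw [List.perm_ext_iff_of_nodup hpw.nodup
      (PySem.Set.nodup_ofList vals)]
    intro a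
    rw [mem_cupKeep _ hnes a, PySem.List.mem_sorted, PySem.Set.mem_ofList]
  · exact hpw

-- ===== VERDICT (by name: the statement is the Claim_ definition above) =====
theorem collect_unique_primers_spec : Claim_equal_collect_unique_primers := by
  intro rows f_col r_col _
  unfold Spec_collect_unique_primers collect_unique_primers collect_unique_primers_alt
  rw [cup_fold_split, cup_fold_eq_ofList, cup_fold_eq_ofList]
  exact congrArg₂ Prod.mk (cup_column rows f_col) (cup_column rows r_col)
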